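-- pv_equiv track=rewrite | github.com/D1abll0/WilsonPercival-tetris | tetris/tetris.py | get_remove_right_zero_from_array
-- ===== SOURCE A (Python) =====
-- def get_remove_right_zero_from_array(array):
--     def is_row_empty(row):
--         for i in row:
--             if i != 0:
--                 return False
--
--         return True
--
--     result = []
--
--     for row in array:
--         buffer = row[:]
--
--         if is_row_empty(buffer):
--             continue
--
--         while buffer[-1] == 0:
--             buffer.pop()
--
--         result.append(buffer)
--
--     return result
-- ===== SOURCE B (Python) =====
-- def get_remove_right_zero_from_array(array):
--     result = []
--     for row in array:
--         idx = len(row)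
--         while idx > 0 and row[idx - 1] == 0:
--             idx -= 1
--         if idx:
--             result.append(row[:idx])
--     return result
-- ===== Notes on version B (the rewrite author's own statement) =====
-- stated objective: simpler
-- what changed: Replaces A's per-row two-pass structure (full forward all-zero check, then copy and backward pop loop) with a single backward scan that finds the cut index, dropping the row when the cut is 0 and slicing otherwise; no copy or mutation.
import Mathlib
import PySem

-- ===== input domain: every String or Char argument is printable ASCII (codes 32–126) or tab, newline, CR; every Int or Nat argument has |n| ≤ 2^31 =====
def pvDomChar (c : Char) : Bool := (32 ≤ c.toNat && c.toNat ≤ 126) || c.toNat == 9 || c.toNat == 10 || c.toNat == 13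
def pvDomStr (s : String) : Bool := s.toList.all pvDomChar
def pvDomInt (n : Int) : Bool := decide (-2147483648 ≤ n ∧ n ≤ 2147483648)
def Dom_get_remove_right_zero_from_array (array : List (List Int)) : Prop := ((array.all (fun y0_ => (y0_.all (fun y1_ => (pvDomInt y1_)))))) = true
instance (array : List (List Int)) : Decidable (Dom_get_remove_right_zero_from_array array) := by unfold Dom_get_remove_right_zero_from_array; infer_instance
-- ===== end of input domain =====

-- B replaces A's per-row forward all-zero check plus backward pop loop with one
-- backward scan computing the cut index (simpler decomposition, no copy/mutation).

-- ===== PORT A =====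
-- A's inner helper is_row_empty, forward scan returning False at the first nonzero
def pvIsRowEmpty : List Int → Bool
  | [] => true
  | i :: r => if i ≠ 0 then false else pvIsRowEmpty r

-- A's 'while buffer[-1] == 0: buffer.pop()' loop (Python raises on empty buffer;
-- unreachable after the is_row_empty guard, the `none` branch returns the buffer)
def pvPopRight (l : List Int) : List Int :=
  match h : l.getLast? with
  | none => l
  | some x => if x = 0 then pvPopRight l.dropLast else l
termination_by l.length
decreasing_by
  have hne : l ≠ [] := by rintro rfl; simp at h
  have := List.length_pos_iff.mpr hne
  simp [List.length_dropLast]; omega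

def get_remove_right_zero_from_array (array : List (List Int)) : List (List Int) :=
  array.foldl (fun result row =>
    let buffer := row
    if pvIsRowEmpty buffer then result
    else result ++ [pvPopRight buffer]) []

-- ===== PORT B =====
-- B's backward 'while idx > 0 and row[idx-1] == 0: idx -= 1' scan
def pvCutIdx (row : List Int) : Nat → Nat
  | 0 => 0
  | i + 1 => if row.getD i 0 = 0 then pvCutIdx row i else i + 1

def get_remove_right_zero_from_array_alt (array : List (List Int)) : List (List Int) :=
  array.foldl (fun result row =>
    let idx := pvCutIdx row row.length
    if idx ≠ 0 then result ++ [row.take idx] else result) []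

-- ===== PRECONDITION & SPEC =====
def Spec_get_remove_right_zero_from_array (array : List (List Int)) (out : List (List Int)) : Prop := out = get_remove_right_zero_from_array_alt array
instance (array : List (List Int)) (out : List (List Int)) : Decidable (Spec_get_remove_right_zero_from_array array out) := by unfold Spec_get_remove_right_zero_from_array; infer_instance

-- ===== CLAIM (what is proved, stated in full; the proofs are below) =====
def Claim_equal_get_remove_right_zero_from_array : Prop := ∀ (array : List (List Int)), Dom_get_remove_right_zero_from_array array → Spec_get_remove_right_zero_from_array array (get_remove_right_zero_from_array array)

-- ===== LEMMAS AND PROOFS =====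

-- canonical form: the row with its trailing zeros removed
def pvCanon (l : List Int) : List Int := (l.reverse.dropWhile (fun x => x == 0)).reverse

lemma pvPopRight_nil : pvPopRight [] = [] := by
  unfold pvPopRight; rfl

lemma pvPopRight_concat (l : List Int) (a : Int) :
    pvPopRight (l ++ [a]) = if a = 0 then pvPopRight l else l ++ [a] := by
  rw [pvPopRight]
  split
  · rename_i h; simp at h
  · rename_i x h
    rw [List.getLast?_concat] at h
    cases h
    simp

lemma pvPopRight_eq_canon (l : List Int) : pvPopRight l = pvCanon l := by
  induction l using List.reverseRecOn with
  | nil => simp [pvPopRight_nil, pvCanon]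
  | append_singleton l a ih =>
      rw [pvPopRight_concat]
      by_cases ha : a = 0
      · subst ha
        simp [pvCanon] at *
        exact ih
      · simp [pvCanon, ha]

lemma pvCutIdx_le (row : List Int) (i : Nat) : pvCutIdx row i ≤ i := by
  induction i with
  | zero => simp [pvCutIdx]
  | succ i ih =>
      rw [pvCutIdx]
      split
      · omega
      · omega

lemma pvCutIdx_append (l : List Int) (a : Int) (i : Nat) (hi : i ≤ l.length) :
    pvCutIdx (l ++ [a]) i = pvCutIdx l i := by
  induction i with
  | zero => rfl
  | succ i ih =>
      have hlt : i < l.length := by omega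
      rw [pvCutIdx, pvCutIdx]
      have hg : (l ++ [a]).getD i 0 = l.getD i 0 := by
        simp [List.getD_eq_getElem?_getD, List.getElem?_append_left hlt]
      rw [hg]
      split
      · exact ih (by omega)
      · rfl

lemma pvTake_cut_eq_canon (l : List Int) : l.take (pvCutIdx l l.length) = pvCanon l := by
  induction l using List.reverseRecOn with
  | nil => simp [pvCutIdx, pvCanon]
  | append_singleton l a ih =>
      have hlen : (l ++ [a]).length = l.length + 1 := by simp
      rw [hlen, pvCutIdx]
      have hg : (l ++ [a]).getD l.length 0 = a := by
        simp [List.getD_eq_getElem?_getD]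
      by_cases ha : a = 0
      · rw [if_pos (by rw [hg, ha])]
        rw [pvCutIdx_append l a l.length le_rfl]
        have hle : pvCutIdx l l.length ≤ l.length := pvCutIdx_le l l.length
        rw [List.take_append_of_le_length hle, ih, ha]
        simp [pvCanon]
      · rw [if_neg (by rw [hg]; exact ha)]
        simp [pvCanon, ha]

lemma pvIsRowEmpty_iff (l : List Int) : pvIsRowEmpty l = true ↔ ∀ x ∈ l, x = 0 := by
  induction l with
  | nil => simp [pvIsRowEmpty]
  | cons x r ih =>
      rw [pvIsRowEmpty]
      by_cases hx : x = 0 <;> simp [hx, ih]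

lemma pvCut_zero_iff (l : List Int) : pvCutIdx l l.length = 0 ↔ ∀ x ∈ l, x = 0 := by
  induction l using List.reverseRecOn with
  | nil => simp [pvCutIdx]
  | append_singleton l a ih =>
      have hlen : (l ++ [a]).length = l.length + 1 := by simp
      rw [hlen, pvCutIdx]
      have hg : (l ++ [a]).getD l.length 0 = a := by
        simp [List.getD_eq_getElem?_getD]
      by_cases ha : a = 0
      · rw [if_pos (by rw [hg, ha]), pvCutIdx_append l a l.length le_rfl]
        subst ha
        simp only [ih]
        constructor
        · intro h x hx; rcases List.mem_append.mp hx with h1 | h1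
          · exact h x h1
          · simpa using h1
        · intro h x hx; exact h x (List.mem_append.mpr (Or.inl hx))
      · rw [if_neg (by rw [hg]; exact ha)]
        constructor
        · intro h; omega
        · intro h; exact absurd (h a (by simp)) ha

lemma pv_fold_eq (array : List (List Int)) (acc : List (List Int)) :
    array.foldl (fun result row =>
      if pvIsRowEmpty row then result
      else result ++ [pvPopRight row]) acc
    = array.foldl (fun result row =>
      if pvCutIdx row row.length ≠ 0 then result ++ [row.take (pvCutIdx row row.length)]
      else result) acc := by
  induction array generalizing acc with
  | nil => rfl
  | cons row rest ih =>
      rw [List.foldl_cons, List.foldl_cons]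
      by_cases h : ∀ x ∈ row, x = 0
      · have h1 : pvIsRowEmpty row = true := (pvIsRowEmpty_iff row).mpr h
        have h2 : pvCutIdx row row.length = 0 := (pvCut_zero_iff row).mpr h
        rw [if_pos h1, if_neg (by simp [h2])]
        exact ih acc
      · have h1 : ¬ pvIsRowEmpty row = true := fun h' => h ((pvIsRowEmpty_iff row).mp h')
        have h2 : pvCutIdx row row.length ≠ 0 := fun hc => h ((pvCut_zero_iff row).mp hc)
        rw [if_neg h1, if_pos h2, pvPopRight_eq_canon, ← pvTake_cut_eq_canon]
        exact ih _

-- ===== VERDICT (by name: the statement is the Claim_ definition above) =====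
theorem get_remove_right_zero_from_array_spec : Claim_equal_get_remove_right_zero_from_array := by
  intro array _
  show _ = _
  simp only [get_remove_right_zero_from_array, get_remove_right_zero_from_array_alt]
  exact pv_fold_eq array []
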